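-- pv_equiv track=rewrite | github.com/Park-taenam/Algorithm | Programmers/DFS_BFS/네트워크/main.py | solution
-- ===== SOURCE A (Python) =====
-- def dfs(graph, v, visit):
--     visit[v] = True
--     for i, k in enumerate(graph[v]):
--         if not visit[i] and k == 1:
--             dfs(graph, i, visit)
--
-- def solution(n, computers):
--     visited = [False] * n
--
--     answer = 0
--     for i in range(n):
--         if visited[i] == False:
--             answer += 1
--         dfs(computers, i, visited)
--
--     return answer
-- ===== SOURCE B (Python) =====
-- def solution(n, computers):
--     visited = [False] * n
--     answer = 0
--     for i in range(n):
--         if not visited[i]: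
--             answer += 1
--             visited[i] = True
--             frontier = [i]
--             while frontier:
--                 nxt = []
--                 for v in frontier:
--                     row = computers[v]
--                     for j in range(len(row)):
--                         if not visited[j] and row[j] == 1:
--                             visited[j] = True
--                             nxt.append(j)
--                 frontier = nxt
--     return answer
-- ===== Notes on version B (the rewrite author's own statement) =====
-- stated objective: alternative
-- what changed: Replaces the recursive depth-first search (invoked unconditionally on every start node) with an iterative layer-by-layer breadth-first traversal using explicit frontier lists, run only from still-unvisited start nodes; both mark exactly the set of nodes reachable over the directed edges, so the component count is identical.
import Mathlib
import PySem

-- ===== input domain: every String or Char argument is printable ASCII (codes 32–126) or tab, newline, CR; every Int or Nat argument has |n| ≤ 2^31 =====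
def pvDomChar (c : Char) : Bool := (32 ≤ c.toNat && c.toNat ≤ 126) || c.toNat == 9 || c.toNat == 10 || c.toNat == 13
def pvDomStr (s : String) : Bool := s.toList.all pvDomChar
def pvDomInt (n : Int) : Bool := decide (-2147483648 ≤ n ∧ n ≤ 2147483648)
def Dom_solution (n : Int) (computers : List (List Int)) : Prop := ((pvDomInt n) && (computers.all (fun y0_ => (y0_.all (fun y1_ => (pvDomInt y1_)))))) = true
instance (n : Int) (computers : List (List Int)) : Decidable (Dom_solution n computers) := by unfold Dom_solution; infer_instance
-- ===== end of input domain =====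

-- B replaces A's recursive DFS (called on every start node) by an iterative frontier-based BFS
-- run only from unvisited starts; same component count (objective: alternative).


-- ===== PORT A =====
-- recursive dfs; fuel only makes the recursion total (inside Pre_ it is provably sufficient);
-- indices are the nonnegative ints of Python's enumerate/range, carried as Nat.
mutual
def dfsA (g : List (List Int)) (fuel : Nat) (v : Nat) (visit : List Bool) : List Bool :=
  match fuel with
  | 0 => visit
  | f + 1 => dfsARow g f (g.getD v []) 0 (visit.set v true)
termination_by (fuel, 0)

-- the 'for i, k in enumerate(graph[v])' loop: row is the remaining suffix, i the current index
def dfsARow (g : List (List Int)) (fuel : Nat) (row : List Int) (i : Nat) (visit : List Bool) : List Bool :=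
  match row with
  | [] => visit
  | k :: rest =>
    if visit.getD i false = false ∧ k = 1 then
      dfsARow g fuel rest (i + 1) (dfsA g fuel i visit)
    else
      dfsARow g fuel rest (i + 1) visit
termination_by (fuel, row.length + 1)
end

def solution (n : Int) (computers : List (List Int)) : Int :=
  ((List.range n.toNat).foldl
    (fun (st : Int × List Bool) i =>
      ((if st.2.getD i false = false then st.1 + 1 else st.1),
       dfsA computers (n.toNat + 1) i st.2))
    (0, List.replicate n.toNat false)).1

-- ===== PORT B =====
-- inner loops of the BFS: scan row of v, mark and collect newly visited nodes
def bfsScan (g : List (List Int)) (st : List Bool × List Nat) (v : Nat) : List Bool × List Nat :=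
  (List.range (g.getD v []).length).foldl
    (fun (st : List Bool × List Nat) j =>
      if st.1.getD j false = false ∧ (g.getD v []).getD j 0 = 1 then
        (st.1.set j true, st.2 ++ [j])
      else st)
    st

-- 'while frontier:' loop; fuel only makes it total (inside Pre_ it is provably sufficient)
def bfsLoop (g : List (List Int)) (fuel : Nat) (visited : List Bool) (frontier : List Nat) : List Bool :=
  match fuel with
  | 0 => visited
  | f + 1 =>
    match frontier with
    | [] => visited
    | _ =>
      let st := frontier.foldl (bfsScan g) (visited, [])
      bfsLoop g f st.1 st.2

def solution_alt (n : Int) (computers : List (List Int)) : Int :=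
  ((List.range n.toNat).foldl
    (fun (st : Int × List Bool) i =>
      if st.2.getD i false = false then
        (st.1 + 1, bfsLoop computers (n.toNat + 1) (st.2.set i true) [i])
      else st)
    (0, List.replicate n.toNat false)).1

-- ===== PRECONDITION & SPEC =====
-- Pre_ excludes exactly the inputs where Python A raises IndexError: some start index
-- i < n has no row (n > len(computers)) or row i is longer than the visited list (length n).
def Pre_solution (n : Int) (computers : List (List Int)) : Prop :=
  n ≤ (computers.length : Int) ∧ ∀ r ∈ computers.take n.toNat, (r.length : Int) ≤ n

instance (n : Int) (computers : List (List Int)) : Decidable (Pre_solution n computers) := by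
  unfold Pre_solution; infer_instance

def pvWitness_solution : Int × List (List Int) := (3, [[1, 1, 0], [1, 1, 0], [0, 0, 1]])

def Spec_solution (n : Int) (computers : List (List Int)) (out : Int) : Prop := out = solution_alt n computers
instance (n : Int) (computers : List (List Int)) (out : Int) : Decidable (Spec_solution n computers out) := by unfold Spec_solution; infer_instance

-- ===== CLAIM (what is proved, stated in full; the proofs are below) =====
def Claim_equal_solution : Prop := ∀ (n : Int) (computers : List (List Int)), Dom_solution n computers → Pre_solution n computers → Spec_solution n computers (solution n computers)

-- ===== LEMMAS AND PROOFS =====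

/- Semantic vocabulary: adjacency, reachability, membership in a visited list. -/
def adjP (g : List (List Int)) (u w : Nat) : Prop := (g.getD u []).getD w 0 = 1
def ReachP (g : List (List Int)) : Nat → Nat → Prop := Relation.ReflTransGen (adjP g)
def memv (C : List Bool) (i : Nat) : Prop := C.getD i false = true
def rowOK (g : List (List Int)) (m : Nat) : Prop := ∀ u, u < m → (g.getD u []).length ≤ m
def closedP (g : List (List Int)) (C : List Bool) : Prop :=
  ∀ u w, memv C u → adjP g u w → memv C w
def newClosed (g : List (List Int)) (C T : List Bool) : Prop :=
  ∀ u w, memv T u → ¬ memv C u → adjP g u w → memv T w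

theorem getD_set_ne (C : List Bool) (v i : Nat) (h : i ≠ v) :
    (C.set v true).getD i false = C.getD i false := by
  simp [List.getD_eq_getElem?_getD, List.getElem?_set_ne (Ne.symm h)]

theorem memv_set_self (C : List Bool) (v : Nat) (h : v < C.length) : memv (C.set v true) v := by
  simp [memv, List.getD_eq_getElem?_getD, List.getElem?_set_self, h]

theorem memv_set_mono (C : List Bool) (v i : Nat) (h : memv C i) : memv (C.set v true) i := by
  by_cases hiv : i = v
  · subst hiv
    have hlt : i < C.length := by
      by_contra hge
      simp [memv, List.getD_eq_getElem?_getD, List.getElem?_eq_none (le_of_not_gt hge)] at h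
    exact memv_set_self C i hlt
  · unfold memv at h ⊢
    rw [getD_set_ne C v i hiv]
    exact h

theorem set_of_memv (C : List Bool) (v : Nat) (h : memv C v) : C.set v true = C := by
  have hlt : v < C.length := by
    by_contra hge
    simp [memv, List.getD_eq_getElem?_getD, List.getElem?_eq_none (le_of_not_gt hge)] at h
  have hv : C[v] = true := by
    simpa [memv, List.getD_eq_getElem?_getD, List.getElem?_eq_getElem hlt] using h
  apply List.ext_getElem (by simp)
  intro i h1 h2
  by_cases hiv : i = v
  · subst hiv; simp [List.getElem_set_self, hv, hlt]
  · simp [List.getElem_set_ne (Ne.symm hiv)]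

theorem memv_getD_false (C : List Bool) (i : Nat) (h : ¬ memv C i) : C.getD i false = false := by
  cases hc : C.getD i false
  · rfl
  · exact absurd hc h

theorem countFalse_set (C : List Bool) (v : Nat) (hlt : v < C.length) (hf : C.getD v false = false) :
    (C.set v true).count false + 1 = C.count false := by
  induction C generalizing v with
  | nil => simp at hlt
  | cons x xs ih =>
    cases v with
    | zero =>
      simp [List.getD_cons_zero] at hf
      simp [List.set, hf, List.count_cons]
    | succ w =>
      simp only [List.length_cons, Nat.succ_lt_succ_iff] at hlt
      simp only [List.getD_cons_succ] at hf
      simp only [List.set, List.count_cons]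
      have := ih w hlt hf
      omega

theorem countFalse_pos (C : List Bool) (v : Nat) (hlt : v < C.length) (hf : C.getD v false = false) :
    0 < C.count false := by
  have := countFalse_set C v hlt hf; omega

theorem countFalse_le_of_pointwise (C T : List Bool) (hlen : C.length = T.length)
    (h : ∀ i, memv C i → memv T i) : T.count false ≤ C.count false := by
  induction C generalizing T with
  | nil => cases T <;> simp_all
  | cons x xs ih =>
    cases T with
    | nil => simp at hlen
    | cons y ys =>
      simp only [List.length_cons, Nat.succ.injEq] at hlen
      have htail : ∀ i, memv xs i → memv ys i := by
        intro i hi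
        have := h (i+1) (by simpa [memv, List.getD_cons_succ] using hi)
        simpa [memv, List.getD_cons_succ] using this
      have hh := ih ys hlen htail
      have hhead : x = true → y = true := by
        intro hx
        have := h 0 (by simp [memv, List.getD_cons_zero, hx])
        simpa [memv, List.getD_cons_zero] using this
      simp only [List.count_cons]
      cases x
      · cases y
        · simp; omega
        · simp; omega
      · have hy := hhead rfl
        subst hy
        simp; omega

mutual
theorem dfsA_len (g : List (List Int)) (f v : Nat) (C : List Bool) :
    (dfsA g f v C).length = C.length := by
  cases f with
  | zero => simp [dfsA]
  | succ f1 =>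
    simp only [dfsA]
    rw [dfsARow_len]
    simp
termination_by (f, 0)
theorem dfsARow_len (g : List (List Int)) (f : Nat) (row : List Int) (i : Nat) (C : List Bool) :
    (dfsARow g f row i C).length = C.length := by
  cases row with
  | nil => simp [dfsARow]
  | cons k rest =>
    simp only [dfsARow]
    split
    · rw [dfsARow_len, dfsA_len]
    · rw [dfsARow_len]
termination_by (f, row.length + 1)
end

mutual
theorem dfsA_mono (g : List (List Int)) (f v : Nat) (C : List Bool) (j : Nat) (h : memv C j) :
    memv (dfsA g f v C) j := by
  cases f with
  | zero => simpa [dfsA] using h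
  | succ f1 =>
    simp only [dfsA]
    exact dfsARow_mono g f1 _ 0 _ j (memv_set_mono C v j h)
termination_by (f, 0)
theorem dfsARow_mono (g : List (List Int)) (f : Nat) (row : List Int) (i : Nat) (C : List Bool)
    (j : Nat) (h : memv C j) : memv (dfsARow g f row i C) j := by
  cases row with
  | nil => simpa [dfsARow] using h
  | cons k rest =>
    simp only [dfsARow]
    split
    · exact dfsARow_mono g f rest (i+1) _ j (dfsA_mono g f i C j h)
    · exact dfsARow_mono g f rest (i+1) C j h
termination_by (f, row.length + 1)
end

mutual
theorem dfsA_sound (g : List (List Int)) (f v : Nat) (C : List Bool) (j : Nat)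
    (h : memv (dfsA g f v C) j) : memv C j ∨ ReachP g v j := by
  cases f with
  | zero => exact Or.inl (by simpa [dfsA] using h)
  | succ f1 =>
    simp only [dfsA] at h
    rcases dfsARow_sound g f1 _ 0 _ j h with h1 | ⟨t, ht, hk, hr⟩
    · by_cases hjv : j = v
      · exact Or.inr (hjv ▸ Relation.ReflTransGen.refl)
      · left
        unfold memv at h1 ⊢
        rwa [getD_set_ne C v j hjv] at h1
    · right
      have hadj : adjP g v t := by simpa [adjP] using hk
      have hr' : ReachP g t j := by simpa using hr
      exact Relation.ReflTransGen.head hadj hr'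
termination_by (f, 0)
theorem dfsARow_sound (g : List (List Int)) (f : Nat) (row : List Int) (i : Nat) (C : List Bool)
    (j : Nat) (h : memv (dfsARow g f row i C) j) :
    memv C j ∨ ∃ t, t < row.length ∧ row.getD t 0 = 1 ∧ ReachP g (i + t) j := by
  cases row with
  | nil => exact Or.inl (by simpa [dfsARow] using h)
  | cons k rest =>
    simp only [dfsARow] at h
    split at h
    · rename_i hg
      rcases dfsARow_sound g f rest (i+1) _ j h with h1 | ⟨t, ht, hk, hr⟩
      · rcases dfsA_sound g f i C j h1 with h2 | h2
        · exact Or.inl h2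
        · exact Or.inr ⟨0, by simp, by simpa using hg.2, by simpa using h2⟩
      · exact Or.inr ⟨t+1, by simpa using ht, by simpa using hk, by
          have : i + (t+1) = (i+1) + t := by omega
          rwa [this]⟩
    · rcases dfsARow_sound g f rest (i+1) C j h with h1 | ⟨t, ht, hk, hr⟩
      · exact Or.inl h1
      · exact Or.inr ⟨t+1, by simpa using ht, by simpa using hk, by
          have : i + (t+1) = (i+1) + t := by omega
          rwa [this]⟩
termination_by (f, row.length + 1)
end

theorem dfsA_marks (g : List (List Int)) (f v : Nat) (C : List Bool) (hf : 1 ≤ f)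
    (hv : v < C.length) : memv (dfsA g f v C) v := by
  cases f with
  | zero => omega
  | succ f1 =>
    simp only [dfsA]
    exact dfsARow_mono g f1 _ 0 _ v (memv_set_self C v hv)

theorem dfsA_countFalse_le (g : List (List Int)) (f v : Nat) (C : List Bool) :
    (dfsA g f v C).count false ≤ C.count false :=
  countFalse_le_of_pointwise C _ (dfsA_len g f v C).symm (fun j => dfsA_mono g f v C j)

mutual
theorem dfsA_main (g : List (List Int)) (f v : Nat) (C : List Bool) (hrow : rowOK g C.length)
    (hv : v < C.length) (hnv : ¬ memv C v) (hcnt : C.count false ≤ f) :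
    newClosed g C (dfsA g f v C) := by
  cases f with
  | zero =>
    exact absurd hcnt (by
      have := countFalse_pos C v hv (memv_getD_false C v hnv); omega)
  | succ f1 =>
    simp only [dfsA]
    have hc1 : (C.set v true).count false ≤ f1 := by
      have := countFalse_set C v hv (memv_getD_false C v hnv); omega
    have hlen1 : 0 + (g.getD v []).length ≤ (C.set v true).length := by
      simpa [List.length_set] using hrow v hv
    obtain ⟨r1, r2⟩ := dfsARow_main g f1 (g.getD v []) 0 (C.set v true)
      (by simpa [List.length_set] using hrow) hlen1 hc1
    intro u w hu hnu hadj
    by_cases huv : u = v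
    · subst huv
      have hwlen : w < (g.getD u []).length := by
        by_contra hge
        have h0 : (g.getD u []).getD w 0 = 0 := by
          rw [List.getD_eq_getElem?_getD, List.getElem?_eq_none (le_of_not_gt hge)]
          rfl
        rw [adjP, h0] at hadj
        exact absurd hadj (by norm_num)
      have := r1 w hwlen (by simpa [adjP] using hadj)
      simpa using this
    · have hnu1 : ¬ memv (C.set v true) u := by
        intro hmem
        apply hnu
        unfold memv at hmem ⊢
        rwa [getD_set_ne C v u huv] at hmem
      exact r2 u w hu hnu1 hadj
termination_by (f, 0)

theorem dfsARow_main (g : List (List Int)) (f : Nat) (row : List Int) (i : Nat) (C : List Bool)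
    (hrow : rowOK g C.length) (hlen : i + row.length ≤ C.length) (hcnt : C.count false ≤ f) :
    (∀ t, t < row.length → row.getD t 0 = 1 → memv (dfsARow g f row i C) (i + t)) ∧
    newClosed g C (dfsARow g f row i C) := by
  cases row with
  | nil =>
    refine ⟨by intro t ht; simp at ht, ?_⟩
    intro u w hu hnu
    exact absurd (by simpa [dfsARow] using hu) hnu
  | cons k rest =>
    simp only [dfsARow]
    by_cases hg : C.getD i false = false ∧ k = 1
    · rw [if_pos hg]
      have hiv : i < C.length := by simp only [List.length_cons] at hlen; omega
      have hnvi : ¬ memv C i := by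
        intro hmem
        unfold memv at hmem
        rw [hg.1] at hmem
        cases hmem
      have hfpos : 1 ≤ f := le_trans (countFalse_pos C i hiv hg.1) hcnt
      have hDlen : (dfsA g f i C).length = C.length := dfsA_len g f i C
      have hclosedCD : newClosed g C (dfsA g f i C) := dfsA_main g f i C hrow hiv hnvi hcnt
      have hmemDi : memv (dfsA g f i C) i := dfsA_marks g f i C hfpos hiv
      have hcntD : (dfsA g f i C).count false ≤ f := le_trans (dfsA_countFalse_le g f i C) hcnt
      obtain ⟨r1, r2⟩ := dfsARow_main g f rest (i+1) (dfsA g f i C) (by rwa [hDlen])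
        (by rw [hDlen]; simp only [List.length_cons] at hlen; omega) hcntD
      constructor
      · intro t ht hkt
        cases t with
        | zero =>
          simpa using dfsARow_mono g f rest (i+1) (dfsA g f i C) i hmemDi
        | succ t1 =>
          have := r1 t1 (by simpa using ht) (by simpa using hkt)
          have heq : i + (t1+1) = (i+1)+t1 := by omega
          rw [heq]; exact this
      · intro u w hu hnu hadj
        by_cases hmemDu : memv (dfsA g f i C) u
        · exact dfsARow_mono g f rest (i+1) _ w (hclosedCD u w hmemDu hnu hadj)
        · exact r2 u w hu hmemDu hadj
    · rw [if_neg hg]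
      obtain ⟨r1, r2⟩ := dfsARow_main g f rest (i+1) C hrow
        (by simp only [List.length_cons] at hlen; omega) hcnt
      constructor
      · intro t ht hkt
        cases t with
        | zero =>
          have hk1 : k = 1 := by simpa using hkt
          have hmem : memv C i := by
            unfold memv
            cases hc : C.getD i false
            · exact absurd ⟨hc, hk1⟩ hg
            · rfl
          simpa using dfsARow_mono g f rest (i+1) C i hmem
        | succ t1 =>
          have := r1 t1 (by simpa using ht) (by simpa using hkt)
          have heq : i + (t1+1) = (i+1)+t1 := by omega
          rw [heq]; exact this
      · exact r2
termination_by (f, row.length + 1)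
end

theorem dfsARow_fix (g : List (List Int)) (f : Nat) (row : List Int) (i : Nat) (C : List Bool)
    (h : ∀ t, t < row.length → row.getD t 0 = 1 → memv C (i + t)) :
    dfsARow g f row i C = C := by
  induction row generalizing i with
  | nil => simp [dfsARow]
  | cons k rest ih =>
    simp only [dfsARow]
    have hguard : ¬ (C.getD i false = false ∧ k = 1) := by
      rintro ⟨hc, hk⟩
      have := h 0 (by simp) (by simpa using hk)
      simp only [Nat.add_zero] at this
      rw [memv, hc] at this
      exact absurd this (by simp)
    rw [if_neg hguard]
    apply ih
    intro t ht hkt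
    have := h (t+1) (by simpa using ht) (by simpa using hkt)
    have heq : i + (t+1) = (i+1)+t := by omega
    rwa [heq] at this

theorem dfsA_fix (g : List (List Int)) (f v : Nat) (C : List Bool) (hc : closedP g C)
    (hv : memv C v) : dfsA g f v C = C := by
  cases f with
  | zero => simp [dfsA]
  | succ f1 =>
    simp only [dfsA]
    rw [set_of_memv C v hv]
    apply dfsARow_fix
    intro t ht hkt
    simpa using hc v t hv (by simpa [adjP] using hkt)

theorem dfsA_char (g : List (List Int)) (f v : Nat) (C : List Bool) (hrow : rowOK g C.length)
    (hv : v < C.length) (hc : closedP g C) (hcnt : C.count false < f) :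
    ∀ i, memv (dfsA g f v C) i ↔ memv C i ∨ ReachP g v i := by
  intro i
  constructor
  · intro h
    exact dfsA_sound g f v C i h
  · intro h
    by_cases hmv : memv C v
    · rw [dfsA_fix g f v C hc hmv]
      rcases h with h | h
      · exact h
      · induction h with
        | refl => exact hmv
        | tail _ hadj ih => exact hc _ _ ih hadj
    · have hnc : newClosed g C (dfsA g f v C) := dfsA_main g f v C hrow hv hmv (by omega)
      have hfull : 1 ≤ f := by omega
      rcases h with h | h
      · exact dfsA_mono g f v C i h
      · induction h with
        | refl => exact dfsA_marks g f v C hfull hv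
        | tail hpath hadj ih =>
          rename_i m w
          by_cases hm : memv C m
          · exact dfsA_mono g f v C w (hc m w hm hadj)
          · exact hnc m w ih hm hadj

def scanStep (row : List Int) (st : List Bool × List Nat) (j : Nat) : List Bool × List Nat :=
  if st.1.getD j false = false ∧ row.getD j 0 = 1 then (st.1.set j true, st.2 ++ [j]) else st

theorem bfsScan_eq (g : List (List Int)) (st : List Bool × List Nat) (v : Nat) :
    bfsScan g st v = (List.range (g.getD v []).length).foldl (scanStep (g.getD v [])) st := rfl

theorem scanFold (row : List Int) (js : List Nat) (V : List Bool) (q : List Nat)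
    (hjs : ∀ j ∈ js, j < V.length) :
    (js.foldl (scanStep row) (V, q)).1.length = V.length ∧
    (∀ i, memv V i → memv (js.foldl (scanStep row) (V, q)).1 i) ∧
    (∃ add, (js.foldl (scanStep row) (V, q)).2 = q ++ add ∧
      (∀ j ∈ add, memv (js.foldl (scanStep row) (V, q)).1 j ∧ ¬ memv V j ∧
        row.getD j 0 = 1 ∧ j < V.length) ∧
      (js.foldl (scanStep row) (V, q)).1.count false + add.length ≤ V.count false ∧
      (∀ i, memv (js.foldl (scanStep row) (V, q)).1 i → memv V i ∨ i ∈ add) ∧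
      (add = [] → (js.foldl (scanStep row) (V, q)).1 = V)) ∧
    (∀ j ∈ js, row.getD j 0 = 1 → memv (js.foldl (scanStep row) (V, q)).1 j) := by
  induction js generalizing V q with
  | nil =>
    refine ⟨rfl, fun i h => h, ⟨[], by simp, by simp, by simp, fun i h => Or.inl h, fun _ => rfl⟩,
      by simp⟩
  | cons j js' ih =>
    have hjV : j < V.length := hjs j (by simp)
    simp only [List.foldl_cons]
    by_cases hg : V.getD j false = false ∧ row.getD j 0 = 1
    · have hstep : scanStep row (V, q) j = (V.set j true, q ++ [j]) := by
        unfold scanStep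
        rw [if_pos]
        exact hg
      rw [hstep]
      have hjs' : ∀ x ∈ js', x < (V.set j true).length := by
        intro x hx; rw [List.length_set]; exact hjs x (by simp [hx])
      obtain ⟨ihl, ihm, ⟨add, hq, hadd, hcnt, hsound, hemp⟩, hproc⟩ :=
        ih (V.set j true) (q ++ [j]) hjs'
      have hmemj : memv (js'.foldl (scanStep row) (V.set j true, q ++ [j])).1 j :=
        ihm j (memv_set_self V j hjV)
      refine ⟨by rw [ihl, List.length_set], ?_, ⟨j :: add, ?_, ?_, ?_, ?_, ?_⟩, ?_⟩
      · intro i h; exact ihm i (memv_set_mono V j i h)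
      · rw [hq]; simp
      · intro x hx
        rcases List.mem_cons.mp hx with rfl | hx'
        · refine ⟨hmemj, ?_, hg.2, hjV⟩
          intro hm
          unfold memv at hm
          rw [hg.1] at hm
          cases hm
        · obtain ⟨h1, h2, h3, h4⟩ := hadd x hx'
          refine ⟨h1, fun hm => h2 (memv_set_mono V j x hm), h3, by
            rwa [List.length_set] at h4⟩
      · have := countFalse_set V j hjV hg.1
        simp only [List.length_cons]
        omega
      · intro i hi
        rcases hsound i hi with h1 | h1
        · by_cases hij : i = j
          · exact Or.inr (by simp [hij])
          · left; unfold memv at h1 ⊢; rwa [getD_set_ne V j i hij] at h1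
        · exact Or.inr (by simp [h1])
      · intro h; cases h
      · intro x hx hrow1
        rcases List.mem_cons.mp hx with rfl | hx'
        · exact hmemj
        · exact hproc x hx' hrow1
    · have hstep : scanStep row (V, q) j = (V, q) := by
        simp only [scanStep, if_neg hg]
      rw [hstep]
      obtain ⟨ihl, ihm, hex, hproc⟩ := ih V q (fun x hx => hjs x (by simp [hx]))
      refine ⟨ihl, ihm, hex, ?_⟩
      intro x hx hrow1
      rcases List.mem_cons.mp hx with rfl | hx'
      · have hmem : memv V x := by
          unfold memv
          cases hc : V.getD x false
          · exact absurd ⟨hc, hrow1⟩ hg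
          · rfl
        exact ihm x hmem
      · exact hproc x hx' hrow1

theorem frontFold (g : List (List Int)) (F : List Nat) (V : List Bool) (q : List Nat)
    (hrow : rowOK g V.length) (hF : ∀ u ∈ F, u < V.length) :
    (F.foldl (bfsScan g) (V, q)).1.length = V.length ∧
    (∀ i, memv V i → memv (F.foldl (bfsScan g) (V, q)).1 i) ∧
    (∃ add, (F.foldl (bfsScan g) (V, q)).2 = q ++ add ∧
      (∀ j ∈ add, memv (F.foldl (bfsScan g) (V, q)).1 j ∧ j < V.length ∧ ∃ u ∈ F, adjP g u j) ∧
      (F.foldl (bfsScan g) (V, q)).1.count false + add.length ≤ V.count false ∧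
      (∀ i, memv (F.foldl (bfsScan g) (V, q)).1 i → memv V i ∨ i ∈ add) ∧
      (add = [] → (F.foldl (bfsScan g) (V, q)).1 = V)) ∧
    (∀ u ∈ F, ∀ w, adjP g u w → memv (F.foldl (bfsScan g) (V, q)).1 w) := by
  induction F generalizing V q with
  | nil =>
    refine ⟨rfl, fun i h => h, ⟨[], by simp, by simp, by simp, fun i h => Or.inl h, fun _ => rfl⟩,
      by simp⟩
  | cons u F' ih =>
    have huV : u < V.length := hF u (by simp)
    simp only [List.foldl_cons, bfsScan_eq]
    have hjs : ∀ j ∈ List.range (g.getD u []).length, j < V.length := by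
      intro j hj
      exact lt_of_lt_of_le (List.mem_range.mp hj) (hrow u huV)
    obtain ⟨sl, sm, ⟨add1, hq1, hadd1, hcnt1, hsound1, hemp1⟩, sproc⟩ :=
      scanFold (g.getD u []) (List.range (g.getD u []).length) V q hjs
    set st1 := (List.range (g.getD u []).length).foldl (scanStep (g.getD u [])) (V, q) with hst1
    obtain ⟨ihl, ihm, ⟨add2, hq2, hadd2, hcnt2, hsound2, hemp2⟩, ihproc⟩ :=
      ih st1.1 st1.2 (by rw [sl]; exact hrow) (by rw [sl]; exact fun x hx => hF x (by simp [hx]))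
    simp only [Prod.mk.eta] at ihl ihm hq2 hadd2 hcnt2 hsound2 hemp2 ihproc
    have hmono1 : ∀ i, memv st1.1 i → memv (F'.foldl (bfsScan g) st1).1 i := by
      intro i hi
      have := ihm i hi
      simpa using this
    refine ⟨by simpa [ihl] using sl, ?_, ⟨add1 ++ add2, ?_, ?_, ?_, ?_, ?_⟩, ?_⟩
    · intro i h
      exact hmono1 i (sm i h)
    · rw [hq2, hq1]; simp
    · intro x hx
      rcases List.mem_append.mp hx with hx1 | hx2
      · obtain ⟨h1, _, h3, h4⟩ := hadd1 x hx1
        exact ⟨hmono1 x h1, h4, u, by simp, by simpa [adjP] using h3⟩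
      · obtain ⟨h1, h2, u', hu', h3⟩ := hadd2 x hx2
        exact ⟨h1, by rwa [sl] at h2, u', by simp [hu'], h3⟩
    · rw [List.length_append]
      omega
    · intro i hi
      rcases hsound2 i hi with h1 | h1
      · rcases hsound1 i h1 with h2 | h2
        · exact Or.inl h2
        · exact Or.inr (List.mem_append.mpr (Or.inl h2))
      · exact Or.inr (List.mem_append.mpr (Or.inr h1))
    · intro h
      rcases List.append_eq_nil_iff.mp h with ⟨h1, h2⟩
      have hv1 : st1.1 = V := hemp1 h1
      have := hemp2 h2
      rw [this, hv1]
    · intro x hx w hadj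
      rcases List.mem_cons.mp hx with rfl | hx'
      · have hwlen : w < (g.getD x []).length := by
          by_contra hge
          have h0 : (g.getD x []).getD w 0 = 0 := by
            rw [List.getD_eq_getElem?_getD, List.getElem?_eq_none (le_of_not_gt hge)]
            rfl
          rw [adjP, h0] at hadj
          exact absurd hadj (by norm_num)
        have := sproc w (List.mem_range.mpr hwlen) (by simpa [adjP] using hadj)
        exact hmono1 w this
      · exact ihproc x hx' w hadj

theorem bfsLoop_nilF (g : List (List Int)) (f : Nat) (V : List Bool) :
    bfsLoop g f V [] = V := by
  cases f <;> rfl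

theorem bfsLoop_char (g : List (List Int)) :
    ∀ (f : Nat) (V : List Bool) (F : List Nat), rowOK g V.length →
    (∀ u ∈ F, u < V.length) → (∀ u ∈ F, memv V u) → V.count false < f →
    (∀ u w, memv V u → u ∉ F → adjP g u w → memv V w) →
    (bfsLoop g f V F).length = V.length ∧
    (∀ a b, memv (bfsLoop g f V F) a → adjP g a b → memv (bfsLoop g f V F) b) ∧
    (∀ i, memv (bfsLoop g f V F) i ↔ memv V i ∨ ∃ u ∈ F, ReachP g u i) := by
  intro f
  induction f with
  | zero => intro V F _ _ _ hcnt _; omega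
  | succ f1 ih =>
    intro V F hrow hFlen hFmem hcnt hproc
    cases F with
    | nil =>
      rw [bfsLoop_nilF]
      refine ⟨rfl, ?_, ?_⟩
      · intro a b ha hadj
        exact hproc a b ha (by simp) hadj
      · intro i
        simp
    | cons u0 F' =>
      have hred : bfsLoop g (f1+1) V (u0 :: F') =
          bfsLoop g f1 ((u0 :: F').foldl (bfsScan g) (V, [])).1
            ((u0 :: F').foldl (bfsScan g) (V, [])).2 := rfl
      rw [hred]
      obtain ⟨sl, sm, ⟨add, hq, hadd, hcntf, hsound, hemp⟩, sproc⟩ :=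
        frontFold g (u0 :: F') V [] hrow hFlen
      set st := ((u0 :: F').foldl (bfsScan g) (V, [])) with hst
      have hq' : st.2 = add := by simpa using hq
      rw [hq']
      by_cases haddnil : add = []
      · subst haddnil
        rw [bfsLoop_nilF]
        have hV : st.1 = V := hemp rfl
        rw [hV]
        have hclo : ∀ a b, memv V a → adjP g a b → memv V b := by
          intro a b ha hadj
          by_cases haF : a ∈ u0 :: F'
          · have := sproc a haF b hadj
            rwa [hV] at this
          · exact hproc a b ha haF hadj
        refine ⟨rfl, hclo, ?_⟩
        intro i
        constructor
        · exact fun h => Or.inl h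
        · rintro (h | ⟨u, hu, hr⟩)
          · exact h
          · induction hr with
            | refl => exact hFmem u hu
            | tail _ hadj ihp => exact hclo _ _ ihp hadj
      · have haddlen : 1 ≤ add.length := by
          cases add
          · exact absurd rfl haddnil
          · simp
        have ihres := ih st.1 add (by rw [sl]; exact hrow)
          (fun x hx => by rw [sl]; exact (hadd x hx).2.1)
          (fun x hx => (hadd x hx).1)
          (by omega)
          (by
            intro a w ha hnaF hadj
            rcases hsound a ha with hVa | hVa
            · by_cases haF : a ∈ u0 :: F'
              · exact sproc a haF w hadj
              · exact sm w (hproc a w hVa haF hadj)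
            · exact absurd hVa hnaF)
        obtain ⟨il, iclo, iiff⟩ := ihres
        have hmemR : ∀ j, memv st.1 j → memv (bfsLoop g f1 st.1 add) j :=
          fun j hj => (iiff j).mpr (Or.inl hj)
        refine ⟨by rw [il, sl], iclo, ?_⟩
        intro i
        constructor
        · intro h
          rcases (iiff i).mp h with h1 | ⟨u, hu, hr⟩
          · rcases hsound i h1 with h2 | h2
            · exact Or.inl h2
            · obtain ⟨_, _, u', hu', hadj⟩ := hadd i h2
              exact Or.inr ⟨u', hu', Relation.ReflTransGen.single hadj⟩
          · obtain ⟨_, _, u', hu', hadj⟩ := hadd u hu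
            exact Or.inr ⟨u', hu', Relation.ReflTransGen.head hadj hr⟩
        · rintro (h1 | ⟨u, hu, hr⟩)
          · exact hmemR i (sm i h1)
          · induction hr with
            | refl => exact hmemR u (sm u (hFmem u hu))
            | tail _ hadj ihp => exact iclo _ _ ihp hadj


theorem memv_set_iff (C : List Bool) (v i : Nat) :
    memv (C.set v true) i ↔ memv C i ∨ (i = v ∧ v < C.length) := by
  by_cases hiv : i = v
  · subst hiv
    by_cases hlt : i < C.length
    · simp [memv_set_self C i hlt, hlt]
    · rw [List.set_eq_of_length_le (le_of_not_gt hlt)]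
      simp [hlt]
  · unfold memv
    rw [getD_set_ne C v i hiv]
    simp [hiv]

theorem memv_replicate (N i : Nat) : ¬ memv (List.replicate N false) i := by
  intro h
  unfold memv at h
  rw [List.getD_eq_getElem?_getD] at h
  rcases Nat.lt_or_ge i N with hlt | hge
  · rw [List.getElem?_eq_getElem (by simpa using hlt)] at h
    simp at h
  · rw [List.getElem?_eq_none (by simpa using hge)] at h
    simp at h

theorem outer_loop (g : List (List Int)) (N : Nat) (hrow : rowOK g N) :
    ∀ (m : Nat), m ≤ N →
    ((List.range m).foldl
      (fun (st : Int × List Bool) i =>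
        ((if st.2.getD i false = false then st.1 + 1 else st.1),
         dfsA g (N + 1) i st.2))
      (0, List.replicate N false)) =
    ((List.range m).foldl
      (fun (st : Int × List Bool) i =>
        if st.2.getD i false = false then
          (st.1 + 1, bfsLoop g (N + 1) (st.2.set i true) [i])
        else st)
      (0, List.replicate N false)) ∧
    ((List.range m).foldl
      (fun (st : Int × List Bool) i =>
        ((if st.2.getD i false = false then st.1 + 1 else st.1),
         dfsA g (N + 1) i st.2))
      (0, List.replicate N false)).2.length = N ∧
    closedP g ((List.range m).foldl
      (fun (st : Int × List Bool) i =>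
        ((if st.2.getD i false = false then st.1 + 1 else st.1),
         dfsA g (N + 1) i st.2))
      (0, List.replicate N false)).2 := by
  intro m
  induction m with
  | zero =>
    intro _
    refine ⟨rfl, by simp, ?_⟩
    intro u w hu
    exact absurd hu (memv_replicate N u)
  | succ m1 ihm =>
    intro hm
    obtain ⟨heq, hlen, hclosed⟩ := ihm (by omega)
    rw [List.range_succ, List.foldl_append, List.foldl_append]
    rw [← heq]
    set st := ((List.range m1).foldl
      (fun (st : Int × List Bool) i =>
        ((if st.2.getD i false = false then st.1 + 1 else st.1),
         dfsA g (N + 1) i st.2))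
      (0, List.replicate N false)) with hst
    simp only [List.foldl_cons, List.foldl_nil]
    have hmN : m1 < N := hm
    have hrowV : rowOK g st.2.length := by rwa [hlen]
    have hcntV : st.2.count false < N + 1 :=
      lt_of_le_of_lt (le_of_le_of_eq (List.count_le_length) hlen) (by omega)
    by_cases hv : st.2.getD m1 false = false
    · rw [if_pos hv, if_pos hv]
      have hmlt : m1 < st.2.length := by omega
      have charA := dfsA_char g (N+1) m1 st.2 hrowV hmlt hclosed hcntV
      have hsetlen : (st.2.set m1 true).length = st.2.length := by simp
      have hcntS : (st.2.set m1 true).count false < N + 1 :=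
        lt_of_le_of_lt
          (countFalse_le_of_pointwise st.2 _ hsetlen.symm (fun j => memv_set_mono st.2 m1 j))
          hcntV
      obtain ⟨blen, _, charB⟩ := bfsLoop_char g (N+1) (st.2.set m1 true) [m1]
        (by rwa [hsetlen])
        (by intro u hu; rw [List.mem_singleton] at hu; subst hu; rwa [hsetlen])
        (by intro u hu; rw [List.mem_singleton] at hu; rw [hu]; exact memv_set_self st.2 m1 hmlt)
        hcntS
        (by
          intro u w hu hnu hadj
          have hum : u ≠ m1 := by
            intro h; exact hnu (by simp [h])
          have huV : memv st.2 u := by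
            unfold memv at hu ⊢
            rwa [getD_set_ne st.2 m1 u hum] at hu
          exact memv_set_mono st.2 m1 w (hclosed u w huV hadj))
      have hiff : ∀ i, memv (dfsA g (N+1) m1 st.2) i ↔
          memv (bfsLoop g (N+1) (st.2.set m1 true) [m1]) i := by
        intro i
        rw [charA i, charB i]
        constructor
        · rintro (h | h)
          · exact Or.inl ((memv_set_iff st.2 m1 i).mpr (Or.inl h))
          · exact Or.inr ⟨m1, by simp, h⟩
        · rintro (h | ⟨u, hu, hr⟩)
          · rcases (memv_set_iff st.2 m1 i).mp h with h1 | ⟨h1, _⟩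
            · exact Or.inl h1
            · exact Or.inr (h1 ▸ Relation.ReflTransGen.refl)
          · rw [List.mem_singleton] at hu
            exact Or.inr (hu ▸ hr)
      have hVeq : dfsA g (N+1) m1 st.2 = bfsLoop g (N+1) (st.2.set m1 true) [m1] := by
        apply List.ext_getElem (by rw [dfsA_len, blen, hsetlen])
        intro i h1 h2
        have hb : (dfsA g (N+1) m1 st.2).getD i false =
            (bfsLoop g (N+1) (st.2.set m1 true) [m1]).getD i false :=
          Bool.eq_iff_iff.mpr (hiff i)
        rwa [List.getD_eq_getElem _ _ h1, List.getD_eq_getElem _ _ h2] at hb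
      refine ⟨by rw [hVeq], by rw [dfsA_len, hlen], ?_⟩
      intro u w hu hadj
      rw [charA u] at hu
      rw [charA w]
      rcases hu with h | h
      · exact Or.inl (hclosed u w h hadj)
      · exact Or.inr (Relation.ReflTransGen.tail h hadj)
    · rw [if_neg hv, if_neg hv]
      have hmem : memv st.2 m1 := by
        unfold memv
        cases hc : st.2.getD m1 false
        · exact absurd hc hv
        · rfl
      have hfix : dfsA g (N+1) m1 st.2 = st.2 := dfsA_fix g (N+1) m1 st.2 hclosed hmem
      refine ⟨?_, by rw [hfix]; exact hlen, by rw [hfix]; exact hclosed⟩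
      rw [hfix]

theorem solution_spec : Claim_equal_solution := by
  unfold Claim_equal_solution Spec_solution
  intro n computers _ hpre
  obtain ⟨hpre1, hpre2⟩ := hpre
  have hng : n.toNat ≤ computers.length := by
    by_cases h0 : 0 ≤ n
    · exact Int.toNat_le.mpr hpre1
    · have hn0 : n ≤ 0 := by omega
      simp [Int.toNat_of_nonpos hn0]
  have hrow : rowOK computers n.toNat := by
    intro u hu
    have hulen : u < computers.length := lt_of_lt_of_le hu hng
    have hgu : computers.getD u [] = computers[u] := by
      rw [List.getD_eq_getElem?_getD, List.getElem?_eq_getElem hulen]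
      rfl
    have hmem : computers[u] ∈ computers.take n.toNat := by
      have h1 : u < (computers.take n.toNat).length := by
        simp [hulen, hu]
      have h2 : (computers.take n.toNat)[u] = computers[u] := by
        simp [List.getElem_take]
      rw [← h2]
      exact List.getElem_mem h1
    have htk := hpre2 _ hmem
    rw [hgu]
    omega
  unfold solution solution_alt
  rw [(outer_loop computers n.toNat hrow n.toNat le_rfl).1]
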